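-- pv_equiv track=rewrite | github.com/HimanshuLadva/Python-DSA | Leetcode/daily/202604/17.py | minMirrorPairDistance
-- ===== SOURCE A (Python) =====
-- from typing import List
-- from math import inf
--
-- def minMirrorPairDistance(nums: List[int]) -> int:
--     prev = dict()
--     ans = inf
--     for i, num in enumerate(nums):
--         if num in prev:
--             ans = min(ans, i - prev[num])
--
--         prev[int(str(nums[i])[::-1])] = i
--
--     return -1 if ans == inf else ans
-- ===== SOURCE B (Python) =====
-- def minMirrorPairDistance(nums):
--     n = len(nums)
--     best = -1
--     for j in range(n):
--         for i in range(j):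
--             if int(str(nums[i])[::-1]) == nums[j]:
--                 d = j - i
--                 if best == -1 or d < best:
--                     best = d
--     return best
-- ===== Notes on version B (the rewrite author's own statement) =====
-- stated objective: alternative
-- what changed: Replaced the single-pass last-reverse-index dictionary with a brute-force double loop over all index pairs i<j testing int(str(nums[i])[::-1]) == nums[j] directly, with a -1 sentinel instead of math.inf.
import Mathlib
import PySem

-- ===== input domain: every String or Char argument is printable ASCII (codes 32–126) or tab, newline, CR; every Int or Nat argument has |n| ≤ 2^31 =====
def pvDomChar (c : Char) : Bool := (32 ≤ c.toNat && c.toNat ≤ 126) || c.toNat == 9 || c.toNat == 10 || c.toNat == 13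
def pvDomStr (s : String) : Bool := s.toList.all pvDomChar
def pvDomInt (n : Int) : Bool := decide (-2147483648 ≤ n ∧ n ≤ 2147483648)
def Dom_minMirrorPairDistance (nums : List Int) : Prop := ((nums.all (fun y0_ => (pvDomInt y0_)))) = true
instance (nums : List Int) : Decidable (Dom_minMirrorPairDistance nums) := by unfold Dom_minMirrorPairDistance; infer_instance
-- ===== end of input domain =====

-- B replaces A's dict single pass by a brute-force double loop over index pairs (alternative algorithm, not faster); return values agree on all non-negative inputs.

-- int(str(x)[::-1]) — exact for x ≥ 0 (Pre_ excludes negatives, where Python raises ValueError); the .getD 0 is never reached on Pre_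
def pyRevDigits (x : Int) : Int :=
  (PySem.Int.ofChars? (PySem.Int.toChars x).reverse).getD 0

-- min(ans, d) with ans possibly math.inf, encoded as Option Int (none = inf)
def ominf (o : Option Int) (d : Int) : Option Int :=
  match o with
  | none => some d
  | some a => some (min a d)

-- ===== PORT A =====
def minMirrorPairDistance (nums : List Int) : Int :=
  let st := (PySem.List.enumerate nums 0).foldl
    (fun (st : PySem.Dict Int Int × Option Int) (p : Int × Int) =>
      let ans := match st.1.get? p.2 with
        | some j => ominf st.2 (p.1 - j)
        | none => st.2
      (st.1.insert (pyRevDigits p.2) p.1, ans))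
    (PySem.Dict.empty, none)
  match st.2 with
  | none => -1
  | some a => a

-- ===== PORT B =====
def minMirrorPairDistance_alt (nums : List Int) : Int :=
  (PySem.List.pyRange 0 nums.length 1).foldl
    (fun best j =>
      (PySem.List.pyRange 0 j 1).foldl
        (fun best i =>
          if pyRevDigits (PySem.List.pyGetD nums i 0) = PySem.List.pyGetD nums j 0 then
            let d := j - i
            if best = -1 ∨ d < best then d else best
          else best)
        best)
    (-1)

-- ===== PRECONDITION & SPEC =====
-- Pre_ excludes lists containing a negative element: there Python A raises ValueError (int("…-") on the reversed string)
def Pre_minMirrorPairDistance (nums : List Int) : Prop := ∀ x ∈ nums, 0 ≤ x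
instance (nums : List Int) : Decidable (Pre_minMirrorPairDistance nums) := by unfold Pre_minMirrorPairDistance; infer_instance
def pvWitness_minMirrorPairDistance : List Int := [12, 21, 13, 31, 21]

def Spec_minMirrorPairDistance (nums : List Int) (out : Int) : Prop := out = minMirrorPairDistance_alt nums
instance (nums : List Int) (out : Int) : Decidable (Spec_minMirrorPairDistance nums out) := by unfold Spec_minMirrorPairDistance; infer_instance

-- ===== CLAIM (what is proved, stated in full; the proofs are below) =====
def Claim_equal_minMirrorPairDistance : Prop := ∀ (nums : List Int), Dom_minMirrorPairDistance nums → Pre_minMirrorPairDistance nums → Spec_minMirrorPairDistance nums (minMirrorPairDistance nums)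

-- ===== LEMMAS AND PROOFS =====

-- value of nums[i] (indices produced by range/enumerate are always in range)
def gIdx (nums : List Int) (i : Nat) : Int := nums.getD i 0

-- last index i < k with pyRevDigits nums[i] = v (A's dict entry for key v)
def lastRev (nums : List Int) (k : Nat) (v : Int) : Option Int :=
  (List.range k).foldl (fun acc i => if pyRevDigits (gIdx nums i) = v then some (i : Int) else acc) none

-- inner minimum: fold of ominf over matches i < k against target value w, distances c - i
def innerMin (nums : List Int) (k : Nat) (w : Int) (c : Int) (o : Option Int) : Option Int :=
  (List.range k).foldl (fun acc i => if pyRevDigits (gIdx nums i) = w then ominf acc (c - (i : Int)) else acc) o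

-- running minimum over all pairs within the first m elements
def bestN (nums : List Int) (m : Nat) : Option Int :=
  (List.range m).foldl (fun o j => innerMin nums j (gIdx nums j) (j : Int) o) none

def encOpt : Option Int → Int
  | none => -1
  | some a => a

def GoodOpt (o : Option Int) : Prop := ∀ a, o = some a → 1 ≤ a

theorem lastRev_succ (nums : List Int) (k : Nat) (v : Int) :
    lastRev nums (k + 1) v =
      if pyRevDigits (gIdx nums k) = v then some (k : Int) else lastRev nums k v := by
  unfold lastRev
  rw [List.range_succ, List.foldl_append]
  simp

theorem innerMin_succ (nums : List Int) (k : Nat) (w : Int) (c : Int) (o : Option Int) :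
    innerMin nums (k + 1) w c o =
      if pyRevDigits (gIdx nums k) = w then ominf (innerMin nums k w c o) (c - (k : Int))
      else innerMin nums k w c o := by
  unfold innerMin
  rw [List.range_succ, List.foldl_append]
  simp

theorem bestN_succ (nums : List Int) (m : Nat) :
    bestN nums (m + 1) = innerMin nums m (gIdx nums m) (m : Int) (bestN nums m) := by
  unfold bestN
  rw [List.range_succ, List.foldl_append]
  simp [innerMin]

theorem lastRev_lt (nums : List Int) (k : Nat) (v : Int) (j : Int)
    (h : lastRev nums k v = some j) : 0 ≤ j ∧ j < (k : Int) := by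
  induction k with
  | zero => simp [lastRev] at h
  | succ k ih =>
    rw [lastRev_succ] at h
    split at h
    · cases h
      constructor <;> omega
    · have := ih h
      constructor <;> omega

theorem innerMin_eq_lastRev (nums : List Int) (k : Nat) (w : Int) (c : Int) (o : Option Int) :
    innerMin nums k w c o =
      match lastRev nums k w with
      | none => o
      | some j => ominf o (c - j) := by
  induction k generalizing o with
  | zero => simp [innerMin, lastRev]
  | succ k ih =>
    rw [innerMin_succ, lastRev_succ]
    split
    · rw [ih]
      cases h : lastRev nums k w with
      | none => simp
      | some j =>
        have hj := lastRev_lt nums k w j h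
        cases o <;> simp [ominf] <;> omega
    · rw [ih]

theorem enumerate_eq_range (xs : List Int) (s : Int) :
    PySem.List.enumerate xs s
      = (List.range xs.length).map (fun (k : Nat) => (s + (k : Int), xs.getD k 0)) := by
  induction xs generalizing s with
  | nil => simp
  | cons x xs ih =>
    rw [PySem.List.enumerate_cons, ih, List.length_cons, List.range_succ_eq_map]
    simp only [List.map_cons, List.map_map]
    congr 1
    · simp
    · apply List.map_congr_left
      intro k _
      simp only [Function.comp_apply, Nat.succ_eq_add_one, List.getD_cons_succ]
      rw [Prod.mk.injEq]
      exact ⟨by push_cast; ring, rfl⟩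

-- A's loop body, with the enumerate index written as a Nat
def stepA (nums : List Int) (st : PySem.Dict Int Int × Option Int) (k : Nat) :
    PySem.Dict Int Int × Option Int :=
  (st.1.insert (pyRevDigits (nums.getD k 0)) (k : Int),
   match st.1.get? (nums.getD k 0) with
   | some j => ominf st.2 ((k : Int) - j)
   | none => st.2)

theorem Afold (nums : List Int) (m : Nat) :
    ((List.range m).foldl (stepA nums) (PySem.Dict.empty, none)).2 = bestN nums m ∧
    ∀ v, ((List.range m).foldl (stepA nums) (PySem.Dict.empty, none)).1.get? v
          = lastRev nums m v := by
  induction m with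
  | zero => simp [bestN, lastRev, PySem.Dict.get?_empty]
  | succ m ih =>
    obtain ⟨h2, h1⟩ := ih
    rw [List.range_succ, List.foldl_append]
    simp only [List.foldl_cons, List.foldl_nil, stepA]
    constructor
    · rw [h1 (nums.getD m 0), h2, bestN_succ, innerMin_eq_lastRev]
      unfold gIdx
      cases lastRev nums m (nums.getD m 0) <;> rfl
    · intro v
      rw [PySem.Dict.get?_insert, lastRev_succ, h1 v]
      unfold gIdx
      by_cases hv : v = pyRevDigits (nums.getD m 0)
      · rw [if_pos hv, if_pos hv.symm]
      · rw [if_neg hv, if_neg (fun h => hv h.symm)]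

theorem A_eq_bestN (nums : List Int) :
    minMirrorPairDistance nums = encOpt (bestN nums nums.length) := by
  unfold minMirrorPairDistance
  rw [enumerate_eq_range, List.foldl_map]
  simp only [zero_add]
  show (match ((List.range nums.length).foldl (stepA nums) (PySem.Dict.empty, none)).2 with
        | none => (-1 : Int)
        | some a => a) = encOpt (bestN nums nums.length)
  rw [(Afold nums nums.length).1]
  cases bestN nums nums.length <;> rfl

theorem SI_eq (nums : List Int) (k : Nat) (w c : Int) (o : Option Int)
    (hk : (k : Int) ≤ c) (ho : GoodOpt o) :
    (List.range k).foldl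
      (fun best (i : Nat) =>
        if pyRevDigits (nums.getD i 0) = w then
          if best = -1 ∨ c - (i : Int) < best then c - (i : Int) else best
        else best) (encOpt o)
      = encOpt (innerMin nums k w c o) ∧ GoodOpt (innerMin nums k w c o) := by
  induction k generalizing o with
  | zero => exact ⟨rfl, by simpa [innerMin] using ho⟩
  | succ k ih =>
    have hk' : (k : Int) ≤ c := by push_cast at hk ⊢; omega
    obtain ⟨h1, h2⟩ := ih o hk' ho
    rw [List.range_succ, List.foldl_append]
    simp only [List.foldl_cons, List.foldl_nil]
    rw [h1, innerMin_succ]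
    by_cases hw : pyRevDigits (nums.getD k 0) = w
    · simp only [gIdx, hw, if_true]
      have hd : 1 ≤ c - (k : Int) := by push_cast at hk; omega
      cases h : innerMin nums k w c o with
      | none =>
        refine ⟨by simp [encOpt, ominf], ?_⟩
        intro a ha
        simp only [ominf] at ha
        cases ha
        omega
      | some a =>
        have ha := h2 a h
        refine ⟨?_, ?_⟩
        · simp only [encOpt, ominf]
          by_cases hlt : c - (k : Int) < a
          · rw [if_pos (Or.inr hlt)]
            omega
          · rw [if_neg (by omega)]
            omega
        · intro b hb
          simp only [ominf] at hb
          cases hb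
          omega
    · simp only [gIdx, hw, if_false]
      exact ⟨trivial, h2⟩

theorem GoodOpt_bestN (nums : List Int) (m : Nat) : GoodOpt (bestN nums m) := by
  induction m with
  | zero => intro a ha; simp [bestN] at ha
  | succ m ih =>
    rw [bestN_succ]
    exact (SI_eq nums m (gIdx nums m) (m : Int) (bestN nums m) le_rfl ih).2

theorem Bfold (nums : List Int) (m : Nat) :
    (List.range m).foldl
      (fun best (j : Nat) =>
        (List.range j).foldl
          (fun best (i : Nat) =>
            if pyRevDigits (nums.getD i 0) = nums.getD j 0 then
              if best = -1 ∨ (j : Int) - (i : Int) < best then (j : Int) - (i : Int) else best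
            else best) best) (-1)
      = encOpt (bestN nums m) := by
  induction m with
  | zero => rfl
  | succ m ih =>
    rw [List.range_succ, List.foldl_append]
    simp only [List.foldl_cons, List.foldl_nil]
    rw [ih, bestN_succ]
    exact (SI_eq nums m (gIdx nums m) (m : Int) (bestN nums m) le_rfl (GoodOpt_bestN nums m)).1

theorem B_eq_bestN (nums : List Int) :
    minMirrorPairDistance_alt nums = encOpt (bestN nums nums.length) := by
  unfold minMirrorPairDistance_alt
  simp only [PySem.List.pyRange_zero_nat, List.foldl_map, PySem.List.pyGetD_natCast]
  exact Bfold nums nums.length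

-- ===== VERDICT (by name: the statement is the Claim_ definition above) =====
theorem minMirrorPairDistance_spec : Claim_equal_minMirrorPairDistance := by
  intro nums _ _
  unfold Spec_minMirrorPairDistance
  rw [A_eq_bestN, B_eq_bestN]
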